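-- pv_equiv track=rewrite | github.com/iwannabetheguy710/rena-src | home/views.py | get_role_and_col
-- ===== SOURCE A (Python) =====
-- def get_role_and_col(ratings):
-- 	__leveling = [x for x in range(1200, 2801, 200)]
-- 	__color = ['grey', 'green', 'teal', 'blue', 'purple', 'violet', 'olive', 'yellow', 'orange', 'red']
-- 	res = ['Level 10', 'red']
-- 	for i in range(len(__leveling)):
-- 		if ratings <= __leveling[i]:
-- 			res = [f'Level {i+1}', __color[i]]
-- 			break
-- 	return res
-- ===== SOURCE B (Python) =====
-- def get_role_and_col(ratings):
--     color = ['grey', 'green', 'teal', 'blue', 'purple', 'violet', 'olive', 'yellow', 'orange', 'red']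
--     i = min(9, max(0, -((1200 - ratings) // 200)))
--     return ['Level {}'.format(i + 1), color[i]]
-- ===== Notes on version B (the rewrite author's own statement) =====
-- stated objective: simpler
-- what changed: Replaced the linear scan over the threshold list with a closed-form bucket index computed by clamped ceiling division.
import Mathlib
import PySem

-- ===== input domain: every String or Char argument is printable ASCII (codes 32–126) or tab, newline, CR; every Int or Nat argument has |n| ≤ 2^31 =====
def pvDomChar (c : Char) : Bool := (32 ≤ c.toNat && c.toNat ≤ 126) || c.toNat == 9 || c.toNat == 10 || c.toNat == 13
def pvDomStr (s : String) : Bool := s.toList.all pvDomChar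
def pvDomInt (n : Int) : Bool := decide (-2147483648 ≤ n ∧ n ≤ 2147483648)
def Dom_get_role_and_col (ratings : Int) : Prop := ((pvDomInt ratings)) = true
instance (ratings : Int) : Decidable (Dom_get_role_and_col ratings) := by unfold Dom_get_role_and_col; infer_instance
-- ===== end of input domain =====

-- B replaces A's linear scan over the threshold list by a closed-form clamped
-- ceiling-division bucket index (objective: simpler).

-- ===== PORT A =====
-- the for-loop with break: walk the index list, stop at the first threshold ≥ ratings
def grcLoop (ratings : Int) (leveling : List Int) (color : List String)
    (idxs : List Int) (res : List String) : List String :=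
  match idxs with
  | [] => res
  | i :: rest =>
    if ratings ≤ PySem.List.pyGetD leveling i 0 then
      ["Level " ++ PySem.Int.toStr (i + 1), PySem.List.pyGetD color i ""]
    else grcLoop ratings leveling color rest res

def get_role_and_col (ratings : Int) : List String :=
  let leveling := PySem.List.pyRange 1200 2801 200
  let color := ["grey", "green", "teal", "blue", "purple", "violet", "olive", "yellow", "orange", "red"]
  let res := ["Level 10", "red"]
  grcLoop ratings leveling color (PySem.List.pyRange 0 (PySem.List.len leveling) 1) res

-- ===== PORT B =====
def get_role_and_col_alt (ratings : Int) : List String :=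
  let color := ["grey", "green", "teal", "blue", "purple", "violet", "olive", "yellow", "orange", "red"]
  let i := min 9 (max 0 (-(PySem.Int.floordiv (1200 - ratings) 200)))
  ["Level " ++ PySem.Int.toStr (i + 1), PySem.List.pyGetD color i ""]

-- ===== PRECONDITION & SPEC =====
def Spec_get_role_and_col (ratings : Int) (out : List String) : Prop := out = get_role_and_col_alt ratings
instance (ratings : Int) (out : List String) : Decidable (Spec_get_role_and_col ratings out) := by unfold Spec_get_role_and_col; infer_instance

-- ===== CLAIM (what is proved, stated in full; the proofs are below) =====
def Claim_equal_get_role_and_col : Prop := ∀ (ratings : Int), Dom_get_role_and_col ratings → Spec_get_role_and_col ratings (get_role_and_col ratings)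

-- ===== LEMMAS AND PROOFS =====

theorem lev_eq : PySem.List.pyRange 1200 2801 200 = [1200, 1400, 1600, 1800, 2000, 2200, 2400, 2600, 2800] := by decide

-- the ceiling-division bucket index equals k on bucket k (buckets 0..9)
theorem ceil_idx_eq (r : Int) (k : Int) (hk0 : 0 ≤ k) (hk : k ≤ 8)
    (hlo : 1200 + (k - 1) * 200 < r ∨ k = 0) (hhi : r ≤ 1200 + k * 200) :
    min 9 (max 0 (-(PySem.Int.floordiv (1200 - r) 200))) = k := by
  rcases hlo with hlo | h0
  · have h : -(PySem.Int.floordiv (-(r - 1200)) 200) = k := by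
      rw [PySem.Int.neg_floordiv_neg_eq_iff_of_pos (by norm_num : (0:Int) < 200)]
      omega
    rw [show (1200 - r) = -(r - 1200) by ring, h]; omega
  · subst h0
    have h : PySem.Int.floordiv (1200 - r) 200 = (1200 - r) / 200 :=
      PySem.Int.floordiv_eq_ediv_of_pos (by norm_num : (0:Int) < 200)
    rw [h]
    have : 0 ≤ (1200 - r) / 200 := Int.ediv_nonneg (by omega) (by norm_num)
    omega

theorem ceil_idx_top (r : Int) (hr : 2800 < r) :
    min 9 (max 0 (-(PySem.Int.floordiv (1200 - r) 200))) = 9 := by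
  have h : PySem.Int.floordiv (1200 - r) 200 < -8 := by
    rw [PySem.Int.floordiv_lt_iff_lt_mul (by norm_num : (0:Int) < 200)]
    omega
  omega

theorem alt_bucket (r : Int) (k : Int) (hk0 : 0 ≤ k) (hk : k ≤ 8)
    (hlo : 1200 + (k - 1) * 200 < r ∨ k = 0) (hhi : r ≤ 1200 + k * 200) :
    get_role_and_col_alt r =
      ["Level " ++ PySem.Int.toStr (k + 1),
       PySem.List.pyGetD ["grey", "green", "teal", "blue", "purple", "violet", "olive", "yellow", "orange", "red"] k ""] := by
  unfold get_role_and_col_alt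
  rw [ceil_idx_eq r k hk0 hk hlo hhi]

theorem get_role_and_col_spec' (r : Int) : get_role_and_col r = get_role_and_col_alt r := by
  have h9 : PySem.List.pyRange 0 (PySem.List.len [(1200:Int), 1400, 1600, 1800, 2000, 2200, 2400, 2600, 2800]) 1 = [0, 1, 2, 3, 4, 5, 6, 7, 8] := by decide
  simp only [get_role_and_col, lev_eq, h9]
  by_cases h0 : r ≤ 1200
  · rw [alt_bucket r 0 (by norm_num) (by norm_num) (Or.inr rfl) (by omega)]
    simp [grcLoop, PySem.List.pyGetD, PySem.List.pyGet?, PySem.List.pyIdx?, h0]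
  by_cases h1 : r ≤ 1400
  · rw [alt_bucket r 1 (by norm_num) (by norm_num) (Or.inl (by omega)) (by omega)]
    simp [grcLoop, PySem.List.pyGetD, PySem.List.pyGet?, PySem.List.pyIdx?, h0, h1]
  by_cases h2 : r ≤ 1600
  · rw [alt_bucket r 2 (by norm_num) (by norm_num) (Or.inl (by omega)) (by omega)]
    simp [grcLoop, PySem.List.pyGetD, PySem.List.pyGet?, PySem.List.pyIdx?, h0, h1, h2]
  by_cases h3 : r ≤ 1800
  · rw [alt_bucket r 3 (by norm_num) (by norm_num) (Or.inl (by omega)) (by omega)]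
    simp [grcLoop, PySem.List.pyGetD, PySem.List.pyGet?, PySem.List.pyIdx?, h0, h1, h2, h3]
  by_cases h4 : r ≤ 2000
  · rw [alt_bucket r 4 (by norm_num) (by norm_num) (Or.inl (by omega)) (by omega)]
    simp [grcLoop, PySem.List.pyGetD, PySem.List.pyGet?, PySem.List.pyIdx?, h0, h1, h2, h3, h4]
  by_cases h5 : r ≤ 2200
  · rw [alt_bucket r 5 (by norm_num) (by norm_num) (Or.inl (by omega)) (by omega)]
    simp [grcLoop, PySem.List.pyGetD, PySem.List.pyGet?, PySem.List.pyIdx?, h0, h1, h2, h3, h4, h5]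
  by_cases h6 : r ≤ 2400
  · rw [alt_bucket r 6 (by norm_num) (by norm_num) (Or.inl (by omega)) (by omega)]
    simp [grcLoop, PySem.List.pyGetD, PySem.List.pyGet?, PySem.List.pyIdx?, h0, h1, h2, h3, h4, h5, h6]
  by_cases h7 : r ≤ 2600
  · rw [alt_bucket r 7 (by norm_num) (by norm_num) (Or.inl (by omega)) (by omega)]
    simp [grcLoop, PySem.List.pyGetD, PySem.List.pyGet?, PySem.List.pyIdx?, h0, h1, h2, h3, h4, h5, h6, h7]
  by_cases h8 : r ≤ 2800
  · rw [alt_bucket r 8 (by norm_num) (by norm_num) (Or.inl (by omega)) (by omega)]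
    simp [grcLoop, PySem.List.pyGetD, PySem.List.pyGet?, PySem.List.pyIdx?, h0, h1, h2, h3, h4, h5, h6, h7, h8]
  · unfold get_role_and_col_alt
    rw [ceil_idx_top r (by omega)]
    simp [grcLoop, PySem.List.pyGetD, PySem.List.pyGet?, PySem.List.pyIdx?, h0, h1, h2, h3, h4, h5, h6, h7, h8]
    decide

-- ===== VERDICT (by name: the statement is the Claim_ definition above) =====
theorem get_role_and_col_spec : Claim_equal_get_role_and_col := by
  intro r _
  exact get_role_and_col_spec' r
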